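-- pv_equiv track=rewrite | github.com/ashuatz/Akashic-Records-Code-Index-System | src/mcp_server.py | format_dependencies_results
-- ===== SOURCE A (Python) =====
-- from typing import Any, Optional, List
--
-- def format_dependencies_results(deps: list[dict[str, Any]]) -> str:
--     """Format dependency results for display"""
--     if not deps:
--         return "No dependencies found."
--
--     output = [f"Found {len(deps)} dependencies:\n"]
--
--     # Group by relationship kind
--     by_kind: dict[str, list[dict[str, Any]]] = {}
--     for dep in deps:
--         kind = dep.get('kind', 'unknown')
--         if kind not in by_kind:
--             by_kind[kind] = []
--         by_kind[kind].append(dep)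
--
--     for kind, kind_deps in sorted(by_kind.items()):
--         output.append(f"\n{kind.upper()}:")
--         for dep in kind_deps:
--             from_symbol = dep.get('from_symbol', '?')
--             to_symbol = dep.get('to_symbol', '?')
--             file_path = dep.get('file_path', '')
--             if file_path:
--                 output.append(f"  {from_symbol} -> {to_symbol} ({file_path})")
--             else:
--                 output.append(f"  {from_symbol} -> {to_symbol}")
--
--     return "\n".join(output)
-- ===== SOURCE B (Python) =====
-- def format_dependencies_results(deps: list[dict[str, any]]) -> str:
--     """Format dependency results for display (no intermediate grouping dict:
--     iterate the sorted distinct kinds and scan deps per kind)."""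
--     if not deps:
--         return "No dependencies found."
--
--     output = [f"Found {len(deps)} dependencies:\n"]
--
--     for kind in sorted({dep.get('kind', 'unknown') for dep in deps}):
--         output.append(f"\n{kind.upper()}:")
--         for dep in deps:
--             if dep.get('kind', 'unknown') == kind:
--                 from_symbol = dep.get('from_symbol', '?')
--                 to_symbol = dep.get('to_symbol', '?')
--                 file_path = dep.get('file_path', '')
--                 if file_path:
--                     output.append(f"  {from_symbol} -> {to_symbol} ({file_path})")
--                 else:
--                     output.append(f"  {from_symbol} -> {to_symbol}")
--
--     return "\n".join(output)
-- ===== Notes on version B (the rewrite author's own statement) =====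
-- stated objective: simpler
-- what changed: B drops A's intermediate grouping dict and its sort of (kind, list) pairs: it sorts the set of distinct kinds once and, for each kind, scans deps emitting the lines of that kind inline (stable left-to-right order preserved).
import Mathlib
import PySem

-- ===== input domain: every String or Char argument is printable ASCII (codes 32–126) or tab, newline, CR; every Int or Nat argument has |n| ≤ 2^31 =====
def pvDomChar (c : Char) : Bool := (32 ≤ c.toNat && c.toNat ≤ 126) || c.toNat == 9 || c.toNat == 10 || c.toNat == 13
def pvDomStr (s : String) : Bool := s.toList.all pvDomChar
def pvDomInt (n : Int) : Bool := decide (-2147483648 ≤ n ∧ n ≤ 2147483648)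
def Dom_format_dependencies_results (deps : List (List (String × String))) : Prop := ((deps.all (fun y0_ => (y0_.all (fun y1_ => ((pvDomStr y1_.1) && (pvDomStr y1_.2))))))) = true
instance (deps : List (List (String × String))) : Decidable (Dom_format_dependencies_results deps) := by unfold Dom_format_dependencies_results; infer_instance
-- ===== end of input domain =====

-- B replaces A's hash-grouping dict by a sorted scan of the distinct kinds (simpler decomposition, same output).

-- ===== PORT A =====
-- dep.get(k, dflt) on the dep dict (association list, first match)
def pvDepGet (dep : List (String × String)) (k dflt : String) : String :=
  (PySem.Dict.mk dep).getD k dflt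

-- dep.get('kind', 'unknown') — used by both Pythons
def pvKindOf (dep : List (String × String)) : String := pvDepGet dep "kind" "unknown"

-- the per-dependency line both Pythons emit ('if file_path:' = non-empty string)
def pvDepLine (dep : List (String × String)) : String :=
  let from_symbol := pvDepGet dep "from_symbol" "?"
  let to_symbol := pvDepGet dep "to_symbol" "?"
  let file_path := pvDepGet dep "file_path" ""
  if file_path ≠ "" then "  " ++ from_symbol ++ " -> " ++ to_symbol ++ " (" ++ file_path ++ ")"
  else "  " ++ from_symbol ++ " -> " ++ to_symbol

-- A's grouping loop: if kind not in by_kind: by_kind[kind] = []; by_kind[kind].append(dep)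
def pvBuildByKind (d : PySem.Dict String (List (List (String × String))))
    (deps : List (List (String × String))) : PySem.Dict String (List (List (String × String))) :=
  deps.foldl (fun d dep =>
    let kind := pvKindOf dep
    let d := if d.contains kind then d else d.insert kind []
    d.modify kind [] (· ++ [dep])) d

def format_dependencies_results (deps : List (List (String × String))) : String :=
  if deps = [] then "No dependencies found."
  else
    let output : List String := ["Found " ++ PySem.Int.toStr (deps.length : Int) ++ " dependencies:\n"]
    let by_kind := pvBuildByKind PySem.Dict.empty deps
    -- sorted(by_kind.items()): dict keys are distinct, so Python's tuple comparison is decided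
    -- by the kind alone — sorting by the first component is exact
    let items := PySem.List.sorted by_kind.items (fun p => p.1) false
    let output := items.foldl (fun acc p =>
      p.2.foldl (fun acc dep => acc ++ [pvDepLine dep])
        (acc ++ ["\n" ++ PySem.Str.upper p.1 ++ ":"])) output
    PySem.Str.join "\n" output

-- ===== PORT B =====
def format_dependencies_results_alt (deps : List (List (String × String))) : String :=
  if deps = [] then "No dependencies found."
  else
    let output : List String := ["Found " ++ PySem.Int.toStr (deps.length : Int) ++ " dependencies:\n"]
    let kinds := PySem.List.sorted (PySem.Set.ofList (deps.map pvKindOf)) (fun k => k) false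
    let output := kinds.foldl (fun acc kind =>
      deps.foldl (fun acc dep =>
        if pvKindOf dep = kind then acc ++ [pvDepLine dep] else acc)
        (acc ++ ["\n" ++ PySem.Str.upper kind ++ ":"])) output
    PySem.Str.join "\n" output

-- ===== PRECONDITION & SPEC =====
def Spec_format_dependencies_results (deps : List (List (String × String))) (out : String) : Prop := out = format_dependencies_results_alt deps
instance (deps : List (List (String × String))) (out : String) : Decidable (Spec_format_dependencies_results deps out) := by unfold Spec_format_dependencies_results; infer_instance

-- ===== CLAIM (what is proved, stated in full; the proofs are below) =====
def Claim_equal_format_dependencies_results : Prop := ∀ (deps : List (List (String × String))), Dom_format_dependencies_results deps → Spec_format_dependencies_results deps (format_dependencies_results deps)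

-- ===== LEMMAS AND PROOFS =====

theorem getD_pvBuildByKind (deps : List (List (String × String)))
    (d : PySem.Dict String (List (List (String × String)))) (k : String) :
    (pvBuildByKind d deps).getD k [] =
      d.getD k [] ++ deps.filter (fun dep => decide (pvKindOf dep = k)) := by
  induction deps generalizing d with
  | nil => simp [pvBuildByKind]
  | cons dep rest ih =>
    simp only [pvBuildByKind, List.foldl_cons] at *
    rw [ih]
    have hbase : ∀ j, ((if d.contains (pvKindOf dep) then d
        else d.insert (pvKindOf dep) []).getD j ([] : List (List (String × String))))
        = d.getD j [] := by
      intro j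
      split_ifs with hc
      · rfl
      · rw [PySem.Dict.getD_insert]
        split_ifs with hj
        · subst hj; rw [PySem.Dict.getD_of_not_contains _ _ (by simpa using hc)]
        · rfl
    rw [PySem.Dict.getD_modify, List.filter_cons]
    by_cases hk : k = pvKindOf dep
    · simp [hk, hbase, List.append_assoc]
    · simp [hk, Ne.symm hk, hbase]

theorem keys_pvBuildByKind (deps : List (List (String × String)))
    (d : PySem.Dict String (List (List (String × String)))) :
    (pvBuildByKind d deps).keys = PySem.Set.update d.keys (deps.map pvKindOf) := by
  induction deps generalizing d with
  | nil => simp [pvBuildByKind, PySem.Set.update_nil]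
  | cons dep rest ih =>
    simp only [pvBuildByKind, List.foldl_cons] at *
    rw [ih, List.map_cons, PySem.Set.update_cons]
    congr 1
    rw [PySem.Dict.keys_modify]
    by_cases hc : d.contains (pvKindOf dep)
    · simp only [hc, if_true]
      rw [PySem.Dict.keys_insert_of_contains _ _ hc,
        PySem.Set.add_of_mem (by simpa [← PySem.Dict.contains_iff_mem_keys] using hc)]
    · have hd : (if d.contains (pvKindOf dep) = true then d
          else d.insert (pvKindOf dep) []) = d.insert (pvKindOf dep) [] := by simp [hc]
      rw [hd, PySem.Dict.keys_insert_of_contains _ _ (PySem.Dict.contains_insert_self _ _ _),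
        PySem.Dict.keys_insert_of_not_contains _ _ (by simpa using hc),
        PySem.Set.add_of_not_mem (by simpa [← PySem.Dict.contains_iff_mem_keys] using hc)]

-- A's outer display loop, closed form
theorem pvFoldA (l : List (String × List (List (String × String)))) (acc : List String) :
    l.foldl (fun acc p =>
        p.2.foldl (fun acc dep => acc ++ [pvDepLine dep])
          (acc ++ ["\n" ++ PySem.Str.upper p.1 ++ ":"])) acc
      = acc ++ l.flatMap (fun p => ("\n" ++ PySem.Str.upper p.1 ++ ":") :: p.2.map pvDepLine) := by
  induction l generalizing acc with
  | nil => simp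
  | cons p rest ih =>
    simp only [List.foldl_cons, List.flatMap_cons]
    rw [PySem.List.foldl_append_singleton_eq_map, ih]
    simp [List.append_assoc]

-- B's outer display loop, closed form
theorem pvFoldB (ks : List String) (deps : List (List (String × String))) (acc : List String) :
    ks.foldl (fun acc kind =>
        deps.foldl (fun acc dep =>
          if pvKindOf dep = kind then acc ++ [pvDepLine dep] else acc)
          (acc ++ ["\n" ++ PySem.Str.upper kind ++ ":"])) acc
      = acc ++ ks.flatMap (fun k => ("\n" ++ PySem.Str.upper k ++ ":")
          :: (deps.filter (fun dep => decide (pvKindOf dep = k))).map pvDepLine) := by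
  induction ks generalizing acc with
  | nil => simp
  | cons k rest ih =>
    simp only [List.foldl_cons, List.flatMap_cons]
    rw [PySem.List.foldl_append_ite, ih]
    simp [List.append_assoc]

-- the sorted items of A's dict are exactly B's sorted kinds paired with their filtered deps
theorem pvSortedItems (deps : List (List (String × String))) :
    PySem.List.sorted (pvBuildByKind PySem.Dict.empty deps).items (fun p => p.1) false
      = (PySem.List.sorted (PySem.Set.ofList (deps.map pvKindOf)) (fun k => k) false).map
          (fun k => (k, deps.filter (fun dep => decide (pvKindOf dep = k)))) := by
  have hkeys : (pvBuildByKind PySem.Dict.empty deps).keys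
      = PySem.Set.ofList (deps.map pvKindOf) := by
    rw [keys_pvBuildByKind, PySem.Dict.keys_empty]
    have h0 := PySem.Set.ofList_append ([] : List String) (deps.map pvKindOf)
    simpa [PySem.Set.ofList_nil] using h0.symm
  have hnd : (pvBuildByKind PySem.Dict.empty deps).keys.Nodup := by
    rw [hkeys]; exact PySem.Set.nodup_ofList _
  have hitems : (pvBuildByKind PySem.Dict.empty deps).items
      = (PySem.Set.ofList (deps.map pvKindOf)).map
          (fun k => (k, deps.filter (fun dep => decide (pvKindOf dep = k)))) := by
    rw [PySem.Dict.items_eq_map_keys _ hnd [], hkeys]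
    apply List.map_congr_left
    intro k _
    rw [getD_pvBuildByKind, PySem.Dict.getD_empty]
    simp
  apply PySem.List.sorted_eq_of_perm_of_pairwise_lt
  · rw [hitems]
    exact (PySem.List.sorted_perm _ _ _).map _
  · rw [List.pairwise_map]
    exact PySem.List.sorted_ofList_pairwise_lt _

-- ===== VERDICT (by name: the statement is the Claim_ definition above) =====
theorem format_dependencies_results_spec : Claim_equal_format_dependencies_results := by
  intro deps _
  unfold Spec_format_dependencies_results format_dependencies_results format_dependencies_results_alt
  by_cases h : deps = []
  · simp [h]
  · simp only [h, if_false]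
    rw [pvFoldA, pvFoldB, pvSortedItems, List.flatMap_map]
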